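-- pv_equiv track=rewrite | github.com/UndiFineD/PyAgent | src/core/base/AgentCore.py | score_improvement_items
-- ===== SOURCE A (Python) =====
-- from typing import List, Dict, Any, Optional
--
-- def score_improvement_items(items: List[str]) -> List[str]:
--     """
--     Heuristic-based scoring to prioritize items.
--     Currently simple FIFO, but can be expanded with complex logic.
--     """
--     # Example criteria: prioritize 'security', 'bug', 'crash'
--     prioritized = []
--     remaining = []
--
--     for item in items:
--         it_low = item.lower()
--         if any(word in it_low for word in ['security', 'vulnerability', 'crash', 'critical']):
--             prioritized.append(item)
--         else:
--             remaining.append(item)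
--
--     return prioritized + remaining
-- ===== SOURCE B (Python) =====
-- def score_improvement_items(items):
--     """One stable sort: prioritized items (key False) come first, each block in original order."""
--     return sorted(
--         items,
--         key=lambda item: not any(
--             word in item.lower()
--             for word in ['security', 'vulnerability', 'crash', 'critical']
--         ),
--     )
-- ===== Notes on version B (the rewrite author's own statement) =====
-- stated objective: simpler
-- what changed: Replaces the two-bucket partition loop and list concatenation with a single stable sort keyed on the negated priority predicate; stability makes prioritized items precede the rest, each in original order.
import Mathlib
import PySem

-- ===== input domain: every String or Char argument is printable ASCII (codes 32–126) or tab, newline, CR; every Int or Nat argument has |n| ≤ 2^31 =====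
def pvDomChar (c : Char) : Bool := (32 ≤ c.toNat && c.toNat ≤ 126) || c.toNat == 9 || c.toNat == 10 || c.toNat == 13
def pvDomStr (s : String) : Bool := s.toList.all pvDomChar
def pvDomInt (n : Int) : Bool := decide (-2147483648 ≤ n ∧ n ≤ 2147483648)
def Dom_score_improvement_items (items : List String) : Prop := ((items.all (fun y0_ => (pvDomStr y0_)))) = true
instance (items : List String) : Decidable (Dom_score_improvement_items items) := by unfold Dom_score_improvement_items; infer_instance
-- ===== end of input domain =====

-- B replaces the two-bucket partition loop with one stable sort keyed on the negated priority predicate (simpler, same result).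

-- shared keyword predicate: any(word in item.lower() for word in [...])
def prioWord (item : String) : Bool :=
  (["security", "vulnerability", "crash", "critical"]).any
    (fun word => PySem.Str.isIn word (PySem.Str.lower item))

-- ===== PORT A =====
def score_improvement_items (items : List String) : List String :=
  let pr := items.foldl
    (fun (acc : List String × List String) item =>
      if prioWord item then (acc.1 ++ [item], acc.2) else (acc.1, acc.2 ++ [item]))
    ([], [])
  pr.1 ++ pr.2

-- ===== PORT B =====
def score_improvement_items_alt (items : List String) : List String :=
  PySem.List.sorted items (fun item => !prioWord item) false

-- ===== PRECONDITION & SPEC =====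
def Spec_score_improvement_items (items : List String) (out : List String) : Prop := out = score_improvement_items_alt items
instance (items : List String) (out : List String) : Decidable (Spec_score_improvement_items items out) := by unfold Spec_score_improvement_items; infer_instance

-- ===== CLAIM (what is proved, stated in full; the proofs are below) =====
def Claim_equal_score_improvement_items : Prop := ∀ (items : List String), Dom_score_improvement_items items → Spec_score_improvement_items items (score_improvement_items items)

-- ===== LEMMAS AND PROOFS =====

-- A's partition loop accumulates the two filters.
theorem foldl_partition (xs : List String) (p r : List String) :
    xs.foldl
      (fun (acc : List String × List String) item =>
        if prioWord item then (acc.1 ++ [item], acc.2) else (acc.1, acc.2 ++ [item]))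
      (p, r)
    = (p ++ xs.filter (fun x => prioWord x), r ++ xs.filter (fun x => !prioWord x)) := by
  induction xs generalizing p r with
  | nil => simp
  | cons x t ih =>
    by_cases hx : prioWord x = true <;> simp [hx, ih]

theorem insertBy_append_not {α : Type} (before : α → α → Bool) (x : α) (F T : List α)
    (h : ∀ y ∈ F, before x y = false) :
    PySem.List.insertBy before x (F ++ T) = F ++ PySem.List.insertBy before x T := by
  induction F with
  | nil => simp
  | cons y F ih =>
    simp only [List.cons_append, PySem.List.insertBy, h y (by simp)]
    simp only [Bool.false_eq_true, if_false, List.cons.injEq, true_and]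
    exact ih (fun z hz => h z (by simp [hz]))

-- B's stable sort equals "prioritized first, rest after", by right-to-left induction on the insertion loop.
theorem sorted_key_partition (xs : List String) :
    PySem.List.sorted xs (fun item => !prioWord item) false
    = xs.filter (fun x => prioWord x) ++ xs.filter (fun x => !prioWord x) := by
  rw [PySem.List.sorted_eq_foldl_insertBy]
  induction xs using List.reverseRecOn with
  | nil => simp
  | append_singleton t x ih =>
    rw [List.foldl_append, List.foldl_cons, List.foldl_nil, ih]
    by_cases hx : prioWord x = true
    · rw [insertBy_append_not _ _ _ _
        (fun y hy => by have := List.of_mem_filter hy; simp_all)]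
      cases hT : t.filter (fun x => !prioWord x) with
      | nil => simp [PySem.List.insertBy, hx, hT]
      | cons z T =>
        have hz : (!prioWord z) = true := List.of_mem_filter (p := fun x => !prioWord x) (hT ▸ List.mem_cons_self ..)
        simp only [PySem.List.insertBy, hx, hz]
        simp [hx, hT]
    · have hall : ∀ y ∈ t.filter (fun x => prioWord x) ++ t.filter (fun x => !prioWord x),
          (decide ((!prioWord x) < (!prioWord y))) = false := by
        intro y _; simp [Bool.lt_iff, hx]
      rw [PySem.List.insertBy_of_forall_not_before _ _ _ hall]
      simp [hx, List.append_assoc]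

-- ===== VERDICT (by name: the statement is the Claim_ definition above) =====
theorem score_improvement_items_spec : Claim_equal_score_improvement_items := by
  intro items _
  show score_improvement_items items = score_improvement_items_alt items
  simp [score_improvement_items, score_improvement_items_alt, foldl_partition,
    sorted_key_partition]
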